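-- pv_equiv track=rewrite | github.com/TheOlgen/Chess-CheckersTransformer | Checkers/checkers_converter.py | to_fen
-- ===== SOURCE A (Python) =====
-- def to_fen(board, turn):
--     fen_rows = []
--     for row in board:
--         empty = 0
--         fen_row = ""
--         for cell in row:
--             if cell == ".":
--                 empty += 1
--             else:
--                 if empty > 0:
--                     fen_row += str(empty)
--                     empty = 0
--                 fen_row += cell
--         if empty > 0:
--             fen_row += str(empty)
--         fen_rows.append(fen_row)
--     return "/".join(fen_rows) + " " + turn
-- ===== SOURCE B (Python) =====
-- def to_fen(board, turn):
--     def encode(row):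
--         s = ""
--         i, n = 0, len(row)
--         while i < n:
--             if row[i] == ".":
--                 j = i
--                 while j < n and row[j] == ".":
--                     j += 1
--                 s += str(j - i)
--                 i = j
--             else:
--                 s += row[i]
--                 i += 1
--         return s
--     return "/".join(encode(row) for row in board) + " " + turn
-- ===== Notes on version B (the rewrite author's own statement) =====
-- stated objective: alternative
-- what changed: B replaces A's per-cell counter-and-flush accumulator (carrying a pending empty count that is flushed at each piece and after the loop) by run-skipping: on meeting an empty cell it scans the whole run of '.' at once, emits its length and jumps past it, so no pending state or end-of-row flush exists.
import Mathlib
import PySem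

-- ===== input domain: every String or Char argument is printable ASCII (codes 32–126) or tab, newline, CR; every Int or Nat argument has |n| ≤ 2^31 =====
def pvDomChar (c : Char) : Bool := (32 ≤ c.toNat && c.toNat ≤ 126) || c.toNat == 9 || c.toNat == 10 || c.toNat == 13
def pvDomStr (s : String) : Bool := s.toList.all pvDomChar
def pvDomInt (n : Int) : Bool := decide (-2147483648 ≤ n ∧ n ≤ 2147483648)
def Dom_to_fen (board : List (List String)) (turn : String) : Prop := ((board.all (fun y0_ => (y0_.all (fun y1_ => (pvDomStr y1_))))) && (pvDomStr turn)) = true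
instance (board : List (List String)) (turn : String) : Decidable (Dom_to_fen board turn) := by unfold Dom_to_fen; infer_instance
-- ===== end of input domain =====

-- B re-encodes each row by skipping whole runs of '.' at once (emit run length, jump past it)
-- instead of A's pending-counter-and-flush accumulator; same cost, different algorithm (objective: alternative).


-- ===== PORT A =====
-- A's inner loop: state (empty, fen_row); '.' increments the counter, a piece flushes it then appends.
def pvStepRowA (st : Int × String) (cell : String) : Int × String :=
  if cell == "." then (st.1 + 1, st.2)
  else (0, (if 0 < st.1 then st.2 ++ PySem.Int.toStr st.1 else st.2) ++ cell)

def pvRowA (row : List String) : String :=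
  let st := row.foldl pvStepRowA (0, "")
  if 0 < st.1 then st.2 ++ PySem.Int.toStr st.1 else st.2

def to_fen (board : List (List String)) (turn : String) : String :=
  let fen_rows := board.foldl (fun acc row => acc ++ [pvRowA row]) ([] : List String)
  PySem.Str.join "/" fen_rows ++ " " ++ turn

-- ===== PORT B =====
-- Source B's while loop over indices i<n, consuming the suffix row[i:], as structural recursion;
-- the inner 'while row[j]=="."' run-scan is takeWhile/dropWhile on the suffix (same scan, same values).
def pvRowB (s : String) : List String → String
  | [] => s
  | c :: r =>
    if c == "." then
      pvRowB (s ++ PySem.Int.toStr (1 + ((r.takeWhile (fun x => x == ".")).length : Int)))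
        (r.dropWhile (fun x => x == "."))
    else
      pvRowB (s ++ c) r
termination_by l => l.length
decreasing_by
  · exact Nat.lt_succ_of_le (List.length_dropWhile_le _ _)
  · simp

def to_fen_alt (board : List (List String)) (turn : String) : String :=
  PySem.Str.join "/" (board.map (fun row => pvRowB "" row)) ++ " " ++ turn

-- ===== PRECONDITION & SPEC =====
def Spec_to_fen (board : List (List String)) (turn : String) (out : String) : Prop := out = to_fen_alt board turn
instance (board : List (List String)) (turn : String) (out : String) : Decidable (Spec_to_fen board turn out) := by unfold Spec_to_fen; infer_instance

-- ===== CLAIM (what is proved, stated in full; the proofs are below) =====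
def Claim_equal_to_fen : Prop := ∀ (board : List (List String)) (turn : String), Dom_to_fen board turn → Spec_to_fen board turn (to_fen board turn)

-- ===== LEMMAS AND PROOFS =====

-- normal form of a row encoding: A's counter recursion made explicit (proof-only)
def pvAux : Int → List String → String
  | e, [] => if 0 < e then PySem.Int.toStr e else ""
  | e, c :: r =>
    if c == "." then pvAux (e + 1) r
    else (if 0 < e then PySem.Int.toStr e else "") ++ c ++ pvAux 0 r

-- A's fold with pending state (e, s) computes s ++ pvAux e row
theorem pvRowA_fold (row : List String) : ∀ (e : Int) (s : String),
    (let st := row.foldl pvStepRowA (e, s);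
     if 0 < st.1 then st.2 ++ PySem.Int.toStr st.1 else st.2) = s ++ pvAux e row := by
  induction row with
  | nil =>
    intro e s
    simp only [List.foldl_nil, pvAux]
    split_ifs <;> simp
  | cons c r ih =>
    intro e s
    by_cases h : (c == ".") = true
    · simp only [List.foldl_cons, pvStepRowA, pvAux, h, if_true, ih]
    · simp only [List.foldl_cons, pvStepRowA, pvAux, h, if_false, Bool.false_eq_true, ih]
      split_ifs <;> simp [String.append_assoc]

-- a pending positive count e followed by row emits toStr (e + run of '.') then continues at the run's end
theorem pvAux_run (row : List String) : ∀ (e : Int), 0 < e →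
    pvAux e row = PySem.Int.toStr (e + ((row.takeWhile (fun x => x == ".")).length : Int))
      ++ pvAux 0 (row.dropWhile (fun x => x == ".")) := by
  induction row with
  | nil =>
    intro e he
    simp [pvAux, he]
  | cons c r ih =>
    intro e he
    by_cases h : (c == ".") = true
    · simp only [pvAux, h, if_true, List.takeWhile_cons, List.dropWhile_cons]
      rw [ih (e + 1) (by omega)]
      congr 2
      simp only [List.length_cons]
      push_cast
      omega
    · simp only [pvAux, h, if_false, Bool.false_eq_true, List.takeWhile_cons, List.dropWhile_cons, he, if_true]
      simp [String.append_assoc]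

-- B's accumulator recursion computes s ++ pvAux 0 row
theorem pvRowB_eq_aux : ∀ (row : List String) (s : String), pvRowB s row = s ++ pvAux 0 row
  | [], s => by simp [pvRowB, pvAux]
  | c :: r, s => by
    by_cases h : (c == ".") = true
    · rw [pvRowB, if_pos h]
      rw [pvRowB_eq_aux (r.dropWhile (fun x => x == ".")) _]
      simp only [pvAux, h, if_true, zero_add]
      rw [pvAux_run r 1 (by omega)]
      simp [String.append_assoc]
    · rw [pvRowB, if_neg h]
      rw [pvRowB_eq_aux r _]
      simp only [pvAux, h, if_false, Bool.false_eq_true]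
      simp [String.append_assoc]
termination_by row => row.length
decreasing_by
  all_goals first
    | exact Nat.lt_succ_of_le (List.length_dropWhile_le _ _)
    | simp

theorem pvRow_eq (row : List String) : pvRowA row = pvRowB "" row := by
  rw [pvRowB_eq_aux]
  have := pvRowA_fold row 0 ""
  simpa [pvRowA] using this

-- ===== VERDICT (by name: the statement is the Claim_ definition above) =====
theorem to_fen_spec : Claim_equal_to_fen := by
  intro board turn _
  unfold Spec_to_fen to_fen to_fen_alt
  rw [PySem.List.foldl_append_singleton_eq_map]
  rw [List.map_congr_left (fun a _ => pvRow_eq a)]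
  simp
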